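-- pv_equiv track=rewrite | github.com/daradib/openwebui-plugins | utils/build_document_store.py | compare_and_plan_updates
-- ===== SOURCE A (Python) =====
-- from typing import Dict, Set
--
-- def compare_and_plan_updates(
--     existing_docs: Dict[str, Dict],
--     filesystem_files: Dict[str, Dict],
-- ) -> tuple[Set[str], Set[str], Set[str]]:
--     """
--     Compare existing documents with filesystem and plan updates.
--
--     Returns:
--         Tuple of (files_to_add, files_to_update, files_to_delete)
--         - files_to_add: Files in filesystem but not in vector store
--         - files_to_update: Files that exist in both but have different size/mtime
--         - files_to_delete: Files in vector store but not in filesystem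
--     """
--     files_to_add = set()
--     files_to_update = set()
--     files_to_delete = set()
--
--     # Find files to add or update
--     for file_path, fs_meta in filesystem_files.items():
--         if file_path in existing_docs:
--             vs_meta = existing_docs[file_path]
--             # Compare file_size and last_modified_date (rsync-like)
--             # Also update files with inconsistent metadata
--             if (
--                 vs_meta["file_size"] != fs_meta["file_size"]
--                 or vs_meta["last_modified_date"] != fs_meta["last_modified_date"]
--                 or not vs_meta["valid"]
--             ):
--                 files_to_update.add(file_path)
--         else:
--             files_to_add.add(file_path)
--
--     # Find files to delete
--     for file_path in existing_docs:
--         if file_path not in filesystem_files: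
--             files_to_delete.add(file_path)
--
--     return files_to_add, files_to_update, files_to_delete
-- ===== SOURCE B (Python) =====
-- def compare_and_plan_updates(existing_docs, filesystem_files):
--     # One merged presence-code map: tag each path with 1 if it is on the
--     # filesystem, plus 2 if it is in the vector store; then a single
--     # classification pass over the codes: 1 -> add, 2 -> delete, 3 -> both
--     # (update when size/mtime differ or the stored metadata is not valid).
--     status = {}
--     for path in filesystem_files:
--         status[path] = 1
--     for path in existing_docs:
--         status[path] = status.get(path, 0) + 2
--     files_to_add = set()
--     files_to_update = set()
--     files_to_delete = set()
--     for path, code in status.items():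
--         if code == 1:
--             files_to_add.add(path)
--         elif code == 2:
--             files_to_delete.add(path)
--         else:
--             vs_meta = existing_docs[path]
--             fs_meta = filesystem_files[path]
--             if (
--                 vs_meta["file_size"] != fs_meta["file_size"]
--                 or vs_meta["last_modified_date"] != fs_meta["last_modified_date"]
--                 or not vs_meta["valid"]
--             ):
--                 files_to_update.add(path)
--     return files_to_add, files_to_update, files_to_delete
-- ===== Notes on version B (the rewrite author's own statement) =====
-- stated objective: alternative
-- what changed: Instead of A's two membership-test loops over the input dicts, B builds one merged presence-code dict (1 = filesystem only, 2 = store only, 3 = both) in two tagging passes and then classifies every path in a single pass over that map, checking metadata only for code-3 paths.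
import Mathlib
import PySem

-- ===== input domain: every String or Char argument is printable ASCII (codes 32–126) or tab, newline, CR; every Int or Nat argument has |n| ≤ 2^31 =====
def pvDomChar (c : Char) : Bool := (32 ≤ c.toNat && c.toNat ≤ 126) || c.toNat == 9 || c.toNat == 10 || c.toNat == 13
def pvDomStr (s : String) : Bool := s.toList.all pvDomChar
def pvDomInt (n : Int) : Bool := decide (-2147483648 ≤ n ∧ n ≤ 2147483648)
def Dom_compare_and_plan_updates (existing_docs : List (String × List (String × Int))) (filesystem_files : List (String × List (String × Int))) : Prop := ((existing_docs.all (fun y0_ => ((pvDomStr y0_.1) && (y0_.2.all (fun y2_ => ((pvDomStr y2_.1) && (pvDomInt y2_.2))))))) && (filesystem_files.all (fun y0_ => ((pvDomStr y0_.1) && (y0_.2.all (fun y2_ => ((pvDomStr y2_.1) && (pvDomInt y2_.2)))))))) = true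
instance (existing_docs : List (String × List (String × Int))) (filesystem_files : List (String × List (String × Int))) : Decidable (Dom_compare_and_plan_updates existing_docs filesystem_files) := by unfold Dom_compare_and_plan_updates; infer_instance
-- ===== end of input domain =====

-- B replaces A's two membership-test loops by one merged presence-code dict (1 = filesystem
-- only, 2 = store only, 3 = both) classified in a single pass: an alternative decomposition.

-- shared helpers: first-match association-list lookup (the Lean convention for a Python dict)
def pvMGet (m : List (String × Int)) (k : String) : Int :=
  ((m.find? (fun p => p.1 == k)).getD ("", 0)).2
def pvMHas (m : List (String × Int)) (k : String) : Bool :=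
  m.any (fun p => p.1 == k)
def pvDGet? (d : List (String × List (String × Int))) (k : String) :
    Option (List (String × Int)) :=
  (d.find? (fun p => p.1 == k)).map (fun p => p.2)
-- the update condition shared by both Pythons (size differs, mtime differs, or not valid)
def pvNeedsUpdate (vs fsm : List (String × Int)) : Bool :=
  (pvMGet vs "file_size" != pvMGet fsm "file_size") ||
  (pvMGet vs "last_modified_date" != pvMGet fsm "last_modified_date") ||
  (pvMGet vs "valid" == 0)

-- ===== PORT A =====
def compare_and_plan_updates (existing_docs : List (String × List (String × Int))) (filesystem_files : List (String × List (String × Int))) : List String × List String × List String :=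
  -- first loop: for file_path, fs_meta in filesystem_files.items(): add / update
  let au := filesystem_files.foldl
    (fun (st : PySem.Set String × PySem.Set String) p =>
      match pvDGet? existing_docs p.1 with
      | some vs =>
        if pvNeedsUpdate vs p.2 then (st.1, PySem.Set.add st.2 p.1) else st
      | none => (PySem.Set.add st.1 p.1, st.2))
    (PySem.Set.empty, PySem.Set.empty)
  -- second loop: for file_path in existing_docs: delete if absent from filesystem
  let del := existing_docs.foldl
    (fun (d : PySem.Set String) p =>
      if (pvDGet? filesystem_files p.1).isSome then d else PySem.Set.add d p.1)
    PySem.Set.empty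
  (au.1, au.2, del)

-- ===== PORT B =====
def compare_and_plan_updates_alt (existing_docs : List (String × List (String × Int))) (filesystem_files : List (String × List (String × Int))) : List String × List String × List String :=
  -- status = {}; for path in filesystem_files: status[path] = 1
  let status0 : PySem.Dict String Int := filesystem_files.foldl
    (fun d p => d.insert p.1 1) PySem.Dict.empty
  -- for path in existing_docs: status[path] = status.get(path, 0) + 2
  let status : PySem.Dict String Int := existing_docs.foldl
    (fun d p => d.insert p.1 (d.getD p.1 0 + 2)) status0
  -- one classification pass over status.items()
  let tri := status.items.foldl
    (fun (st : PySem.Set String × PySem.Set String × PySem.Set String) kc =>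
      if kc.2 == 1 then (PySem.Set.add st.1 kc.1, st.2.1, st.2.2)
      else if kc.2 == 2 then (st.1, st.2.1, PySem.Set.add st.2.2 kc.1)
      else
        if pvNeedsUpdate ((pvDGet? existing_docs kc.1).getD [])
                         ((pvDGet? filesystem_files kc.1).getD [])
        then (st.1, PySem.Set.add st.2.1 kc.1, st.2.2)
        else st)
    (PySem.Set.empty, PySem.Set.empty, PySem.Set.empty)
  (tri.1, tri.2.1, tri.2.2)

-- ===== PRECONDITION & SPEC =====
-- boolean form of "A reads every metadata key it needs without a KeyError" for one common path,
-- mirroring the or-short-circuit of A's condition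
def pvPreMeta (vs fsm : List (String × Int)) : Bool :=
  pvMHas vs "file_size" && pvMHas fsm "file_size" &&
  ((pvMGet vs "file_size" != pvMGet fsm "file_size") ||
   (pvMHas vs "last_modified_date" && pvMHas fsm "last_modified_date" &&
    ((pvMGet vs "last_modified_date" != pvMGet fsm "last_modified_date") ||
     pvMHas vs "valid")))

-- Pre_ excludes (i) association lists with duplicate keys, which represent no Python dict
-- (the two dicts A receives always have unique keys), and (ii) the inputs on which A raises
-- KeyError because a metadata key it reads is missing for a path present in both dicts.
def Pre_compare_and_plan_updates (existing_docs : List (String × List (String × Int))) (filesystem_files : List (String × List (String × Int))) : Prop :=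
  (existing_docs.map Prod.fst).Nodup ∧ (filesystem_files.map Prod.fst).Nodup ∧
  filesystem_files.all (fun p =>
    match pvDGet? existing_docs p.1 with
    | some vs => pvPreMeta vs p.2
    | none => true) = true
instance (existing_docs : List (String × List (String × Int))) (filesystem_files : List (String × List (String × Int))) : Decidable (Pre_compare_and_plan_updates existing_docs filesystem_files) := by unfold Pre_compare_and_plan_updates; infer_instance

def pvWitness_compare_and_plan_updates : (List (String × List (String × Int))) × (List (String × List (String × Int))) :=
  ([("a", [("file_size", 1), ("last_modified_date", 2), ("valid", 1)]), ("b", [])],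
   [("a", [("file_size", 1), ("last_modified_date", 2)]), ("c", [])])

def Spec_compare_and_plan_updates (existing_docs : List (String × List (String × Int))) (filesystem_files : List (String × List (String × Int))) (out : List String × List String × List String) : Prop := out = compare_and_plan_updates_alt existing_docs filesystem_files
instance (existing_docs : List (String × List (String × Int))) (filesystem_files : List (String × List (String × Int))) (out : List String × List String × List String) : Decidable (Spec_compare_and_plan_updates existing_docs filesystem_files out) := by unfold Spec_compare_and_plan_updates; infer_instance

-- ===== CLAIM (what is proved, stated in full; the proofs are below) =====
def Claim_equal_compare_and_plan_updates : Prop := ∀ (existing_docs : List (String × List (String × Int))) (filesystem_files : List (String × List (String × Int))), Dom_compare_and_plan_updates existing_docs filesystem_files → Pre_compare_and_plan_updates existing_docs filesystem_files → Spec_compare_and_plan_updates existing_docs filesystem_files (compare_and_plan_updates existing_docs filesystem_files)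

-- ===== LEMMAS AND PROOFS =====

lemma pv_add_fresh (s : List String) (x : String) (h : x ∉ s) :
    PySem.Set.add s x = s ++ [x] := by
  simp [PySem.Set.add, PySem.Set.contains, h]

-- lookup succeeds iff the key occurs
lemma pv_dget_isSome (d : List (String × List (String × Int))) (k : String) :
    (pvDGet? d k).isSome = (d.map Prod.fst).contains k := by
  induction d with
  | nil => simp [pvDGet?]
  | cons p ps ih =>
    by_cases h : p.1 = k
    · subst h; simp [pvDGet?]
    · have h1 : (p.1 == k) = false := by simp [h]
      have h2 : (k == p.1) = false := beq_eq_false_iff_ne.mpr (Ne.symm h)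
      simpa [pvDGet?, List.find?_cons, h1, List.contains_cons, h2] using ih

-- on a duplicate-free association list, lookup of a present pair returns its value
lemma pv_dget_mem (d : List (String × List (String × Int)))
    (hnd : (d.map Prod.fst).Nodup) (p : String × List (String × Int)) (hp : p ∈ d) :
    pvDGet? d p.1 = some p.2 := by
  induction d with
  | nil => cases hp
  | cons q qs ih =>
    simp only [List.map_cons, List.nodup_cons] at hnd
    rcases List.mem_cons.mp hp with hp | hp
    · subst hp; simp [pvDGet?]
    · have hmem : p.1 ∈ qs.map Prod.fst := List.mem_map_of_mem hp
      have hne : (q.1 == p.1) = false := by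
        refine beq_eq_false_iff_ne.mpr ?_
        intro h; exact hnd.1 (h ▸ hmem)
      have := ih hnd.2 hp
      simpa [pvDGet?, List.find?_cons, hne] using this

-- the add/update loop of A, computed in closed form
lemma pv_foldAU (ed fs : List (String × List (String × Int))) (a u : List String)
    (hnd : (fs.map Prod.fst).Nodup)
    (ha : ∀ k ∈ fs.map Prod.fst, k ∉ a) (hu : ∀ k ∈ fs.map Prod.fst, k ∉ u) :
    fs.foldl
      (fun (st : PySem.Set String × PySem.Set String) p =>
        match pvDGet? ed p.1 with
        | some vs =>
          if pvNeedsUpdate vs p.2 then (st.1, PySem.Set.add st.2 p.1) else st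
        | none => (PySem.Set.add st.1 p.1, st.2)) (a, u) =
    (a ++ (fs.filter (fun p => !(pvDGet? ed p.1).isSome)).map Prod.fst,
     u ++ (fs.filter (fun p =>
        (pvDGet? ed p.1).isSome && pvNeedsUpdate ((pvDGet? ed p.1).getD []) p.2)).map Prod.fst) := by
  induction fs generalizing a u with
  | nil => simp
  | cons p ps ih =>
    simp only [List.map_cons, List.nodup_cons] at hnd
    have hpa : p.1 ∉ a := ha p.1 (by simp)
    have hpu : p.1 ∉ u := hu p.1 (by simp)
    have ha' : ∀ k ∈ ps.map Prod.fst, k ∉ a := fun k hk => ha k (by simp [hk])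
    have hu' : ∀ k ∈ ps.map Prod.fst, k ∉ u := fun k hk => hu k (by simp [hk])
    cases hopt : pvDGet? ed p.1 with
    | none =>
      have ha2 : ∀ k ∈ ps.map Prod.fst, k ∉ a ++ [p.1] := by
        intro k hk
        simp only [List.mem_append, List.mem_singleton]
        rintro (h | rfl)
        · exact ha' k hk h
        · exact hnd.1 hk
      simp only [List.foldl_cons, hopt, pv_add_fresh a p.1 hpa]
      rw [ih _ _ hnd.2 ha2 hu']
      simp [hopt]
    | some vs =>
      by_cases hc : pvNeedsUpdate vs p.2
      · have hu2 : ∀ k ∈ ps.map Prod.fst, k ∉ u ++ [p.1] := by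
          intro k hk
          simp only [List.mem_append, List.mem_singleton]
          rintro (h | rfl)
          · exact hu' k hk h
          · exact hnd.1 hk
        simp only [List.foldl_cons, hopt, hc, if_true,
          pv_add_fresh u p.1 hpu]
        rw [ih _ _ hnd.2 ha' hu2]
        simp [hopt, hc]
      · rw [Bool.not_eq_true] at hc
        simp only [List.foldl_cons, hopt, hc, Bool.false_eq_true, if_false]
        rw [ih _ _ hnd.2 ha' hu']
        simp [hopt, hc]

-- the delete loop of A, computed in closed form
lemma pv_foldDel (fs ed : List (String × List (String × Int))) (d : List String)
    (hnd : (ed.map Prod.fst).Nodup) (hd : ∀ k ∈ ed.map Prod.fst, k ∉ d) :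
    ed.foldl
      (fun (acc : PySem.Set String) p =>
        if (pvDGet? fs p.1).isSome then acc else PySem.Set.add acc p.1) d =
    d ++ (ed.filter (fun p => !(pvDGet? fs p.1).isSome)).map Prod.fst := by
  induction ed generalizing d with
  | nil => simp
  | cons p ps ih =>
    simp only [List.map_cons, List.nodup_cons] at hnd
    have hpd : p.1 ∉ d := hd p.1 (by simp)
    have hd' : ∀ k ∈ ps.map Prod.fst, k ∉ d := fun k hk => hd k (by simp [hk])
    cases hopt : pvDGet? fs p.1 with
    | some vs =>
      simp only [List.foldl_cons, hopt, Option.isSome_some, if_true]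
      rw [ih _ hnd.2 hd']
      simp [hopt]
    | none =>
      have hd2 : ∀ k ∈ ps.map Prod.fst, k ∉ d ++ [p.1] := by
        intro k hk
        simp only [List.mem_append, List.mem_singleton]
        rintro (h | rfl)
        · exact hd' k hk h
        · exact hnd.1 hk
      simp only [List.foldl_cons, hopt, Option.isSome_none, Bool.false_eq_true, if_false,
        pv_add_fresh d p.1 hpd]
      rw [ih _ hnd.2 hd2]
      simp [hopt]

-- B's second tagging pass, computed in closed form: present keys get +2 in place,
-- fresh keys are appended with code 2
lemma pv_foldTag (ed : List (String × List (String × Int))) (s : PySem.Dict String Int)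
    (hnd : (ed.map Prod.fst).Nodup) (hks : s.keys.Nodup) :
    (ed.foldl (fun d p => d.insert p.1 (d.getD p.1 0 + 2)) s).items =
    s.items.map (fun q => if (ed.map Prod.fst).contains q.1 then (q.1, q.2 + 2) else q)
      ++ (ed.filter (fun p => !(s.contains p.1))).map (fun p => (p.1, (2 : Int))) := by
  induction ed generalizing s with
  | nil => simp
  | cons p ps ih =>
    simp only [List.map_cons, List.nodup_cons] at hnd
    have hks' : (s.insert p.1 (s.getD p.1 0 + 2)).keys.Nodup :=
      PySem.Dict.nodup_keys_insert s _ _ hks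
    have hpn : ((ps.map Prod.fst).contains p.1) = false := by simpa using hnd.1
    have hfilt : ∀ (t : PySem.Dict String Int), (∀ k, t.contains k = ((k == p.1) || s.contains k)) →
        ps.filter (fun q => !(t.contains q.1)) = ps.filter (fun q => !(s.contains q.1)) := by
      intro t ht
      apply List.filter_congr
      intro q hq
      have hqp : (q.1 == p.1) = false := by
        refine beq_eq_false_iff_ne.mpr ?_
        intro h; exact hnd.1 (h ▸ List.mem_map_of_mem hq)
      rw [ht q.1, hqp, Bool.false_or]
    have hcont : ∀ k, (s.insert p.1 (s.getD p.1 0 + 2)).contains k = ((k == p.1) || s.contains k) :=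
      fun k => PySem.Dict.contains_insert s p.1 k _
    cases hc : s.contains p.1 with
    | true =>
      simp only [List.foldl_cons]
      rw [ih _ hnd.2 hks',
          PySem.Dict.items_insert_of_contains s (s.getD p.1 0 + 2) hc, List.map_map,
          List.filter_cons_of_neg (by simp [hc]), hfilt _ hcont]
      congr 1
      apply List.map_congr_left
      intro q hq
      by_cases hqp : q.1 = p.1
      · have hqmem : (p.1, q.2) ∈ s.items := by rw [← hqp]; exact hq
        have hq2 : s.getD p.1 0 = q.2 := PySem.Dict.getD_of_mem_items s hqmem hks 0
        have hqb : (q.1 == p.1) = true := by simp [hqp]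
        simp only [Function.comp, hqb, if_true, hpn]
        simp [hqp, hq2]
      · have hqb : (q.1 == p.1) = false := beq_eq_false_iff_ne.mpr hqp
        have hcc : (p.1 :: List.map Prod.fst ps).contains q.1
            = (List.map Prod.fst ps).contains q.1 := by simp [hqp]
        simp only [Function.comp, hqb, Bool.false_eq_true, if_false, List.map_cons] at *
        simp only [hcc]
    | false =>
      simp only [List.foldl_cons]
      have hgd : s.getD p.1 0 = 0 := PySem.Dict.getD_of_not_contains s 0 hc
      rw [ih _ hnd.2 hks',
          PySem.Dict.items_insert_of_not_contains s (s.getD p.1 0 + 2) hc,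
          List.map_append, List.filter_cons_of_pos (by simp [hc]), hfilt _ hcont,
          List.append_assoc]
      congr 1
      · apply List.map_congr_left
        intro q hq
        have hqp : (q.1 == p.1) = false := by
          refine beq_eq_false_iff_ne.mpr ?_
          intro h
          have : q.1 ∈ s.keys := PySem.Dict.mem_keys_of_mem_items s hq
          rw [h, ← PySem.Dict.contains_iff_mem_keys] at this
          rw [this] at hc; cases hc
        have hcc : (p.1 :: List.map Prod.fst ps).contains q.1
            = (List.map Prod.fst ps).contains q.1 := by simp [beq_eq_false_iff_ne.mp hqp]
        simp only [List.map_cons, hcc]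
      · simp [hgd]
        intro x hx
        exact hnd.1 (List.mem_map.mpr ⟨(p.1, x), hx, rfl⟩)

-- B's classification pass, computed in closed form
lemma pv_foldCls (ed fs : List (String × List (String × Int)))
    (L : List (String × Int)) (a u d : List String)
    (hnd : (L.map Prod.fst).Nodup)
    (ha : ∀ k ∈ L.map Prod.fst, k ∉ a) (hu : ∀ k ∈ L.map Prod.fst, k ∉ u)
    (hd : ∀ k ∈ L.map Prod.fst, k ∉ d) :
    L.foldl
      (fun (st : PySem.Set String × PySem.Set String × PySem.Set String) kc =>
        if kc.2 == 1 then (PySem.Set.add st.1 kc.1, st.2.1, st.2.2)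
        else if kc.2 == 2 then (st.1, st.2.1, PySem.Set.add st.2.2 kc.1)
        else
          if pvNeedsUpdate ((pvDGet? ed kc.1).getD []) ((pvDGet? fs kc.1).getD [])
          then (st.1, PySem.Set.add st.2.1 kc.1, st.2.2)
          else st) (a, u, d) =
    (a ++ (L.filter (fun q => q.2 == 1)).map Prod.fst,
     u ++ (L.filter (fun q => !(q.2 == 1) && !(q.2 == 2) &&
        pvNeedsUpdate ((pvDGet? ed q.1).getD []) ((pvDGet? fs q.1).getD []))).map Prod.fst,
     d ++ (L.filter (fun q => !(q.2 == 1) && q.2 == 2)).map Prod.fst) := by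
  induction L generalizing a u d with
  | nil => simp
  | cons q qs ih =>
    simp only [List.map_cons, List.nodup_cons] at hnd
    have hqa : q.1 ∉ a := ha q.1 (by simp)
    have hqu : q.1 ∉ u := hu q.1 (by simp)
    have hqd : q.1 ∉ d := hd q.1 (by simp)
    have ha' : ∀ k ∈ qs.map Prod.fst, k ∉ a := fun k hk => ha k (by simp [hk])
    have hu' : ∀ k ∈ qs.map Prod.fst, k ∉ u := fun k hk => hu k (by simp [hk])
    have hd' : ∀ k ∈ qs.map Prod.fst, k ∉ d := fun k hk => hd k (by simp [hk])
    have hfresh : ∀ (x : List String), x = a ∨ x = u ∨ x = d →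
        ∀ k ∈ qs.map Prod.fst, k ∉ x ++ [q.1] := by
      rintro x hx k hk
      simp only [List.mem_append, List.mem_singleton]
      rintro (h | rfl)
      · rcases hx with rfl | rfl | rfl
        · exact ha' k hk h
        · exact hu' k hk h
        · exact hd' k hk h
      · exact hnd.1 hk
    by_cases h1 : q.2 = 1
    · have h1b : (q.2 == 1) = true := by simp [h1]
      simp only [List.foldl_cons, h1b, if_true, pv_add_fresh a q.1 hqa]
      rw [ih _ u d hnd.2 (hfresh _ (Or.inl rfl)) hu' hd']
      simp [h1b]
    · have h1b : (q.2 == 1) = false := beq_eq_false_iff_ne.mpr h1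
      by_cases h2 : q.2 = 2
      · have h2b : (q.2 == 2) = true := by simp [h2]
        simp only [List.foldl_cons, h1b, Bool.false_eq_true, if_false, h2b, if_true,
          pv_add_fresh d q.1 hqd]
        rw [ih a u _ hnd.2 ha' hu' (hfresh _ (Or.inr (Or.inr rfl)))]
        simp [h1b, h2b]
      · have h2b : (q.2 == 2) = false := beq_eq_false_iff_ne.mpr h2
        by_cases hc : pvNeedsUpdate ((pvDGet? ed q.1).getD []) ((pvDGet? fs q.1).getD [])
        · simp only [List.foldl_cons, h1b, h2b, hc, Bool.false_eq_true, if_false, if_true]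
          rw [pv_add_fresh u q.1 hqu, ih a _ d hnd.2 ha' (hfresh _ (Or.inr (Or.inl rfl))) hd']
          simp [h1b, h2b, hc]
        · rw [Bool.not_eq_true] at hc
          simp only [List.foldl_cons, h1b, h2b, hc, Bool.false_eq_true, if_false]
          rw [ih a u d hnd.2 ha' hu' hd']
          simp [h1b, h2b, hc]


-- list containment as a decidable membership (bridges Dict.contains to key-list membership)
lemma pv_contains_decide (l : List String) (x : String) : l.contains x = decide (x ∈ l) := by
  by_cases h : x ∈ l <;> simp [h]

-- ===== VERDICT (by name: the statement is the Claim_ definition above) =====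
theorem compare_and_plan_updates_spec : Claim_equal_compare_and_plan_updates := by
  intro ed fs _hdom hpre
  obtain ⟨hned, hnfs, -⟩ := hpre
  unfold Spec_compare_and_plan_updates
  unfold compare_and_plan_updates compare_and_plan_updates_alt
  dsimp only [PySem.Set.empty]
  -- A's two loops in closed form
  rw [pv_foldAU ed fs [] [] hnfs (by simp) (by simp),
      pv_foldDel fs ed [] hned (by simp)]
  -- B's first tagging pass in closed form
  have h0 : (fs.foldl (fun d p => d.insert p.1 (1 : Int)) PySem.Dict.empty).items
      = fs.map (fun p => (p.1, (1 : Int))) := by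
    rw [PySem.Dict.items_foldl_insert_fresh fs Prod.fst (fun _ => (1 : Int))
        PySem.Dict.empty (by intro a _; exact PySem.Dict.contains_empty _) hnfs]
    simp [PySem.Dict.empty]
  have hk0 : (fs.foldl (fun d p => d.insert p.1 (1 : Int)) PySem.Dict.empty).keys
      = fs.map Prod.fst := by
    simp only [PySem.Dict.keys, h0, List.map_map]
    rfl
  have hc0 : ∀ k, (fs.foldl (fun d p => d.insert p.1 (1 : Int)) PySem.Dict.empty).contains k
      = (fs.map Prod.fst).contains k := by
    intro k
    rw [PySem.Dict.contains_eq_decide_mem_keys, hk0, pv_contains_decide]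
  -- B's second tagging pass in closed form
  rw [pv_foldTag ed _ hned (by rw [hk0]; exact hnfs), h0, List.map_map]
  -- rewrite the status0 conditions into plain key-list conditions
  have hL2 : (ed.filter (fun p =>
        !((fs.foldl (fun d p => d.insert p.1 (1 : Int)) PySem.Dict.empty).contains p.1)))
      = ed.filter (fun p => !((fs.map Prod.fst).contains p.1)) := by
    apply List.filter_congr
    intro p _
    rw [hc0]
  rw [hL2]
  -- the classification pass over the concatenated items list
  set L1 : List (String × Int) := fs.map
    ((fun q => if (ed.map Prod.fst).contains q.1 = true then (q.1, q.2 + 2) else q) ∘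
      fun p => (p.1, (1 : Int))) with hL1def
  set L2 : List (String × Int) :=
    (ed.filter (fun p => !((fs.map Prod.fst).contains p.1))).map
      (fun p => (p.1, (2 : Int))) with hL2def
  have hfst1 : L1.map Prod.fst = fs.map Prod.fst := by
    rw [hL1def, List.map_map]
    apply List.map_congr_left
    intro p _
    simp only [Function.comp]
    split <;> rfl
  have hfst2 : L2.map Prod.fst
      = (ed.filter (fun p => !((fs.map Prod.fst).contains p.1))).map Prod.fst := by
    rw [hL2def, List.map_map]; rfl
  have hndL : ((L1 ++ L2).map Prod.fst).Nodup := by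
    rw [List.map_append, hfst1, hfst2, List.nodup_append]
    refine ⟨hnfs, List.Nodup.sublist (List.Sublist.map Prod.fst List.filter_sublist) hned, ?_⟩
    intro k hk1 k' hk2
    simp only [List.mem_map, List.mem_filter] at hk2
    obtain ⟨p, ⟨-, hpc⟩, rfl⟩ := hk2
    intro h
    rw [← h, pv_contains_decide] at hpc
    simp [hk1] at hpc
  rw [pv_foldCls ed fs (L1 ++ L2) [] [] [] hndL (by simp) (by simp) (by simp)]
  simp only [List.nil_append, List.filter_append, List.map_append]
  -- L2's codes are all 2
  have hf2 : ∀ (g : String × Int → Bool), (∀ k, g (k, 2) = false) → L2.filter g = [] := by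
    intro g hg
    rw [hL2def, List.filter_map, List.filter_eq_nil_iff.mpr]
    · simp
    · intro p _
      simp [Function.comp, hg p.1]
  refine Prod.ext ?_ (Prod.ext ?_ ?_)
  · -- files_to_add
    dsimp only
    rw [hf2 _ (by intro k; rfl)]
    simp only [List.map_nil, List.append_nil]
    rw [hL1def, List.filter_map, List.map_map]
    have : ∀ p ∈ fs, ((fun q => !(pvDGet? ed q.1).isSome) p) =
        (((fun (q : String × Int) => q.2 == 1) ∘
          ((fun q => if (ed.map Prod.fst).contains q.1 = true then (q.1, q.2 + 2) else q) ∘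
            fun p => (p.1, (1 : Int)))) p) := by
      intro p _
      simp only [Function.comp, pv_dget_isSome]
      cases h : (ed.map Prod.fst).contains p.1 with
      | true => simp only [Bool.not_true, if_true]; rfl
      | false => simp only [Bool.not_false, Bool.false_eq_true, if_false]; rfl
    rw [List.filter_congr this]
    apply List.map_congr_left
    intro p _
    simp only [Function.comp]
    split <;> rfl
  · -- files_to_update
    dsimp only
    rw [hf2 _ (by intro k; rfl)]
    simp only [List.map_nil, List.append_nil]
    rw [hL1def, List.filter_map, List.map_map]
    have : ∀ p ∈ fs, (((fun p => (pvDGet? ed p.1).isSome &&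
          pvNeedsUpdate ((pvDGet? ed p.1).getD []) p.2) : _ → Bool) p) =
        (((fun (q : String × Int) => !(q.2 == 1) && !(q.2 == 2) &&
            pvNeedsUpdate ((pvDGet? ed q.1).getD []) ((pvDGet? fs q.1).getD [])) ∘
          ((fun q => if (ed.map Prod.fst).contains q.1 = true then (q.1, q.2 + 2) else q) ∘
            fun p => (p.1, (1 : Int)))) p) := by
      intro p hp
      simp only [Function.comp, pv_dget_isSome]
      cases h : (ed.map Prod.fst).contains p.1 with
      | true => simp [pv_dget_mem fs hnfs p hp]
      | false => simp
    rw [List.filter_congr this]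
    apply List.map_congr_left
    intro p _
    simp only [Function.comp]
    split <;> rfl
  · -- files_to_delete
    dsimp only
    have h1 : L1.filter (fun q => !(q.2 == 1) && q.2 == 2) = [] := by
      rw [hL1def, List.filter_map, List.filter_eq_nil_iff.mpr]
      · simp
      · intro p _
        cases h : (ed.map Prod.fst).contains p.1 with
        | true => simp only [Function.comp, h, if_true]; decide
        | false => simp only [Function.comp, h, Bool.false_eq_true, if_false]; decide
    rw [h1]
    simp only [List.map_nil, List.nil_append]
    rw [hL2def, List.filter_map, List.map_map]
    have h2 : (ed.filter (fun p => !((fs.map Prod.fst).contains p.1))).filter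
        (((fun (q : String × Int) => !(q.2 == 1) && q.2 == 2)) ∘ (fun p => (p.1, (2 : Int))))
        = ed.filter (fun p => !((fs.map Prod.fst).contains p.1)) := by
      apply List.filter_eq_self.mpr
      intro p _
      rfl
    rw [h2]
    apply congrArg
    apply List.filter_congr
    intro p _
    rw [pv_dget_isSome]
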